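-- pv_equiv track=rewrite | github.com/SIA-IOTechnology/Kittysploit-framework | core/utils/module_static_metadata.py | infer_module_type_from_path
-- ===== SOURCE A (Python) =====
-- def infer_module_type_from_path(module_path: str) -> str:
--     """Map filesystem path prefix to a module type string (aligned with DB / filters)."""
--     path = (module_path or "").lower()
--     ordered = (
--         ("analysis/", "auxiliary"),
--         ("auxiliary/scanner/", "auxiliary"),
--         ("auxiliary/", "auxiliary"),
--         ("browser_exploits/", "browser_exploits"),
--         ("browser_auxiliary/", "browser_auxiliary"),
--         ("docker_environment/", "docker_environment"),
--         ("exploits/", "exploits"),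
--         ("scanner/", "scanner"),
--         ("post/", "post"),
--         ("payloads/", "payloads"),
--         ("payload/", "payloads"),
--         ("workflow/", "workflow"),
--         ("listeners/", "listeners"),
--         ("listener/", "listeners"),
--         ("encoders/", "encoders"),
--         ("encoder/", "encoders"),
--         ("obfuscators/", "obfuscator"),
--         ("obfuscator/", "obfuscator"),
--         ("backdoors/", "backdoors"),
--         ("shortcut/", "shortcut"),
--     )
--     for pref, mtype in ordered:
--         if path.startswith(pref):
--             return mtype
--     parts = path.split("/")
--     if parts and parts[0]:
--         first = parts[0].lower()
--         remap = {
--             "exploit": "exploits",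
--             "payload": "payloads",
--             "scanner": "scanner",
--             "listener": "listeners",
--             "encoder": "encoders",
--         }
--         return remap.get(first, first)
--     return "auxiliary"
-- ===== SOURCE B (Python) =====
-- PREFIX_MAP = {
--     "analysis": "auxiliary",
--     "auxiliary": "auxiliary",
--     "browser_exploits": "browser_exploits",
--     "browser_auxiliary": "browser_auxiliary",
--     "docker_environment": "docker_environment",
--     "exploits": "exploits",
--     "scanner": "scanner",
--     "post": "post",
--     "payloads": "payloads",
--     "payload": "payloads",
--     "workflow": "workflow",
--     "listeners": "listeners",
--     "listener": "listeners",
--     "encoders": "encoders",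
--     "encoder": "encoders",
--     "obfuscators": "obfuscator",
--     "obfuscator": "obfuscator",
--     "backdoors": "backdoors",
--     "shortcut": "shortcut",
-- }
--
-- REMAP = {
--     "exploit": "exploits",
--     "payload": "payloads",
--     "scanner": "scanner",
--     "listener": "listeners",
--     "encoder": "encoders",
-- }
--
--
-- def infer_module_type_from_path(module_path: str) -> str:
--     """Map filesystem path prefix to a module type string (aligned with DB / filters)."""
--     path = (module_path or "").lower()
--     head, sep, _ = path.partition("/")
--     if sep and head in PREFIX_MAP:
--         return PREFIX_MAP[head]
--     if head:
--         return REMAP.get(head, head)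
--     return "auxiliary"
-- ===== Notes on version B (the rewrite author's own statement) =====
-- stated objective: simpler
-- what changed: Replaces the ordered scan over twenty slash-terminated prefixes with one partition of the path at its first slash and two keyed dict lookups on the extracted head segment (module-level constant tables), eliminating the prefix scan and the one redundant two-segment prefix entry, which the corresponding single-segment key already subsumes.
import Mathlib
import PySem

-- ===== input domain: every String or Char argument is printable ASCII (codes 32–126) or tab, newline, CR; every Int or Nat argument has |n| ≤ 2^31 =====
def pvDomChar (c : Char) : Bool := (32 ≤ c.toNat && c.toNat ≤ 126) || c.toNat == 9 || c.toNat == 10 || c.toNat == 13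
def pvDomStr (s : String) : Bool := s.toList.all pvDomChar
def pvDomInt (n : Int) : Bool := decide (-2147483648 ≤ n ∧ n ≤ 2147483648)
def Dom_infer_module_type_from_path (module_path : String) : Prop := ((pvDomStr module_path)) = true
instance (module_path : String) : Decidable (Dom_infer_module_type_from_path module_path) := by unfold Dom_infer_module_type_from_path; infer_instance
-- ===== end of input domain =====

-- B replaces A's ordered scan over twenty "name/" prefixes by one partition of the
-- path at its first '/' plus two keyed dictionary lookups on the head segment (simpler).


-- ===== PORT A =====
-- the ordered prefix table of A
def pvOrdered : List (String × String) :=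
  [("analysis/", "auxiliary"),
   ("auxiliary/scanner/", "auxiliary"),
   ("auxiliary/", "auxiliary"),
   ("browser_exploits/", "browser_exploits"),
   ("browser_auxiliary/", "browser_auxiliary"),
   ("docker_environment/", "docker_environment"),
   ("exploits/", "exploits"),
   ("scanner/", "scanner"),
   ("post/", "post"),
   ("payloads/", "payloads"),
   ("payload/", "payloads"),
   ("workflow/", "workflow"),
   ("listeners/", "listeners"),
   ("listener/", "listeners"),
   ("encoders/", "encoders"),
   ("encoder/", "encoders"),
   ("obfuscators/", "obfuscator"),
   ("obfuscator/", "obfuscator"),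
   ("backdoors/", "backdoors"),
   ("shortcut/", "shortcut")]

-- the 'for pref, mtype in ordered: if path.startswith(pref): return mtype' loop
def pvScan (path : String) : List (String × String) → Option String
  | [] => none
  | (pref, mtype) :: rest =>
      if PySem.Str.startswith path pref then some mtype else pvScan path rest

def infer_module_type_from_path (module_path : String) : String :=
  let path := PySem.Str.lower module_path   -- (module_path or "") is the identity on a str argument
  match pvScan path pvOrdered with
  | some mtype => mtype
  | none =>
    let parts := (PySem.Str.split? path "/").getD []   -- sep = "/" ≠ "", so split? is always some
    match parts with
    | [] => "auxiliary"                                -- 'if parts and parts[0]' false on empty list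
    | first0 :: _ =>
      if first0 ≠ "" then
        let first := PySem.Str.lower first0
        let remap : PySem.Dict String String :=
          PySem.Dict.ofList
            [("exploit", "exploits"), ("payload", "payloads"), ("scanner", "scanner"),
             ("listener", "listeners"), ("encoder", "encoders")]
        remap.getD first first
      else "auxiliary"

-- ===== PORT B =====
def pvPrefixMap : PySem.Dict String String :=
  PySem.Dict.ofList
    [("analysis", "auxiliary"),
     ("auxiliary", "auxiliary"),
     ("browser_exploits", "browser_exploits"),
     ("browser_auxiliary", "browser_auxiliary"),
     ("docker_environment", "docker_environment"),
     ("exploits", "exploits"),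
     ("scanner", "scanner"),
     ("post", "post"),
     ("payloads", "payloads"),
     ("payload", "payloads"),
     ("workflow", "workflow"),
     ("listeners", "listeners"),
     ("listener", "listeners"),
     ("encoders", "encoders"),
     ("encoder", "encoders"),
     ("obfuscators", "obfuscator"),
     ("obfuscator", "obfuscator"),
     ("backdoors", "backdoors"),
     ("shortcut", "shortcut")]

def pvRemap : PySem.Dict String String :=
  PySem.Dict.ofList
    [("exploit", "exploits"), ("payload", "payloads"), ("scanner", "scanner"),
     ("listener", "listeners"), ("encoder", "encoders")]

def infer_module_type_from_path_alt (module_path : String) : String :=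
  let path := PySem.Str.lower module_path
  -- head, sep, _ = path.partition("/")  (hand port, exact: head = text before the
  -- first '/', sep nonempty iff '/' occurs in path)
  let head := String.ofList (path.toList.takeWhile (· ≠ '/'))
  let sep := path.toList.contains '/'
  if sep && pvPrefixMap.contains head then (pvPrefixMap.get? head).getD ""  -- key present, getD default unreachable
  else if head ≠ "" then pvRemap.getD head head
  else "auxiliary"

-- ===== PRECONDITION & SPEC =====
def Spec_infer_module_type_from_path (module_path : String) (out : String) : Prop := out = infer_module_type_from_path_alt module_path
instance (module_path : String) (out : String) : Decidable (Spec_infer_module_type_from_path module_path out) := by unfold Spec_infer_module_type_from_path; infer_instance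

-- ===== CLAIM (what is proved, stated in full; the proofs are below) =====
def Claim_equal_infer_module_type_from_path : Prop := ∀ (module_path : String), Dom_infer_module_type_from_path module_path → Spec_infer_module_type_from_path module_path (infer_module_type_from_path module_path)

-- ===== LEMMAS AND PROOFS =====


theorem sw_eq (name : List Char) (h : '/' ∉ name) : ∀ (l : List Char),
    PySem.Chars.startswith l (name ++ ['/'])
      = (decide (l.takeWhile (· ≠ '/') = name) && l.contains '/') := by
  induction name with
  | nil =>
    intro l
    cases l with
    | nil => simp [PySem.Chars.startswith]
    | cons c t =>
      by_cases hc : c = '/'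
      · subst hc; simp [PySem.Chars.startswith, List.isPrefixOf]
      · simp [PySem.Chars.startswith, List.isPrefixOf, hc, Ne.symm hc]
  | cons a nm ih =>
    intro l
    have ha : a ≠ '/' := fun e => h (e ▸ List.mem_cons_self)
    have hnm : '/' ∉ nm := fun e => h (List.mem_cons_of_mem _ e)
    cases l with
    | nil => simp [PySem.Chars.startswith]
    | cons c t =>
      by_cases hc : c = '/'
      · subst hc
        simp [PySem.Chars.startswith, List.isPrefixOf, Ne.symm ha]
        intro e; exact absurd e ha
      · by_cases hac : a = c
        · subst hac
          have := ih hnm t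
          simp [PySem.Chars.startswith, List.isPrefixOf, hc] at this ⊢
          rw [this]
          simp [Ne.symm ha]
        · have h1 : (a == c) = false := by simp [hac]
          have h2 : decide (c = a) = false := by simp [Ne.symm hac]
          simp [PySem.Chars.startswith, List.isPrefixOf, h1, h2]
          intro e
          simp [List.takeWhile_cons, hc] at e
          exact absurd e.1.symm hac


theorem go_head : ∀ (fuel : Nat) (l cur : List Char) (accs : List (List Char)),
    l.length < fuel →
    ∃ rest, PySem.Chars.splitOn.go ['/'] fuel l cur accs
      = accs.reverse ++ (cur.reverse ++ l.takeWhile (· ≠ '/')) :: rest := by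
  intro fuel
  induction fuel with
  | zero => intro l cur accs h; omega
  | succ f ih =>
    intro l cur accs h
    cases l with
    | nil =>
      exact ⟨[], by simp [PySem.Chars.splitOn.go]⟩
    | cons c t =>
      by_cases hc : c = '/'
      · subst hc
        obtain ⟨r, hr⟩ := ih t [] (cur.reverse :: accs) (by simpa using Nat.lt_of_succ_lt_succ h)
        refine ⟨t.takeWhile (· ≠ '/') :: r, ?_⟩
        simp [PySem.Chars.splitOn.go] at hr ⊢
        simp [hr]
      · obtain ⟨r, hr⟩ := ih t (c :: cur) accs (by simpa using Nat.lt_of_succ_lt_succ h)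
        refine ⟨r, ?_⟩
        have hpre : (['/'].isPrefixOf (c :: t)) = false := by simp [List.isPrefixOf, Ne.symm hc]
        simp [PySem.Chars.splitOn.go, hpre, hc] at hr ⊢
        simpa using hr

theorem splitOn_head (l : List Char) :
    ∃ rest, PySem.Chars.splitOn l ['/'] = (l.takeWhile (· ≠ '/')) :: rest := by
  obtain ⟨r, hr⟩ := go_head (l.length + 1) l [] [] (by omega)
  exact ⟨r, by simpa [PySem.Chars.splitOn] using hr⟩

theorem lowerChar_idem (c : Char) : PySem.Chars.lowerChar (PySem.Chars.lowerChar c) = PySem.Chars.lowerChar c := by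
  unfold PySem.Chars.lowerChar PySem.Chars.isupper
  by_cases hA : 'A' ≤ c
  · by_cases hZ : c ≤ 'Z'
    · have h0 : 65 ≤ c.toNat := UInt32.le_iff_toNat_le.mp (Char.le_def.mp hA)
      have h1 : c.toNat ≤ 90 := UInt32.le_iff_toNat_le.mp (Char.le_def.mp hZ)
      have hval : (c.toNat + 32).isValidChar := by
        unfold Nat.isValidChar; left; omega
      have ht : (Char.ofNat (c.toNat + 32)).toNat = c.toNat + 32 := by
        rw [Char.toNat_ofNat, if_pos hval]
      have hnz : ¬ (Char.ofNat (c.toNat + 32) ≤ 'Z') := by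
        rw [Char.le_def]
        intro hle
        have : (Char.ofNat (c.toNat + 32)).toNat ≤ 90 := UInt32.le_iff_toNat_le.mp hle
        omega
      simp [hA, hZ, hnz]
    · simp [hZ]
  · simp [hA]

theorem lower_takeWhile (l : List Char) :
    PySem.Chars.lower ((PySem.Chars.lower l).takeWhile (· ≠ '/')) = (PySem.Chars.lower l).takeWhile (· ≠ '/') := by
  unfold PySem.Chars.lower
  rw [List.takeWhile_map, List.map_map]
  exact List.map_congr_left (fun a _ => lowerChar_idem a)

theorem ofList_eq_iff (h : List Char) (t : String) : (String.ofList h = t) ↔ h = t.toList := by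
  constructor
  · intro e; rw [← e]; simp
  · intro e; subst e; simp



theorem sw_str (m : List Char) (pre base : String) (hpre : pre.toList = base.toList ++ ['/'])
    (hb : '/' ∉ base.toList) :
    PySem.Chars.startswith m pre.toList
      = (decide (m.takeWhile (· ≠ '/') = base.toList) && m.contains '/') := by
  rw [hpre]; exact sw_eq _ hb m

theorem lit_beq (t : String) (h : List Char) : (t == String.ofList h) = decide (h = t.toList) := by
  by_cases he : h = t.toList
  · subst he; simp
  · have hne : t ≠ String.ofList h := fun e => he ((ofList_eq_iff h t).mp e.symm)
    simp [hne, he]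

theorem main_eq (s : String) : infer_module_type_from_path s = infer_module_type_from_path_alt s := by
  have hlow : PySem.Chars.lower ((PySem.Chars.lower s.toList).takeWhile (· ≠ '/'))
      = (PySem.Chars.lower s.toList).takeWhile (· ≠ '/') := lower_takeWhile s.toList
  obtain ⟨rest, hrest⟩ := splitOn_head (PySem.Chars.lower s.toList)
  by_cases hsc : PySem.Chars.startswith (PySem.Chars.lower s.toList) "auxiliary/scanner/".toList = true
  · -- path starts with "auxiliary/scanner/": A returns "auxiliary" at the second entry
    have h2 : PySem.Chars.startswith (PySem.Chars.lower s.toList) ("auxiliary".toList ++ ['/']) = true := by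
      rw [PySem.Chars.startswith_iff] at hsc ⊢
      exact List.IsPrefix.trans (by decide) hsc
    rw [sw_eq "auxiliary".toList (by decide) _] at h2
    simp only [Bool.and_eq_true, decide_eq_true_eq] at h2
    unfold infer_module_type_from_path infer_module_type_from_path_alt
    simp only [pvScan, pvOrdered, PySem.Str.startswith, PySem.Str.lower, String.toList_ofList,
      sw_str (PySem.Chars.lower s.toList) "analysis/" "analysis" rfl (by decide),
      hsc, h2.1, h2.2]
    norm_num
    decide
  · unfold infer_module_type_from_path infer_module_type_from_path_alt
    simp only [pvScan, pvOrdered, PySem.Str.startswith, PySem.Str.lower, String.toList_ofList,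
      PySem.Str.split?, PySem.Chars.split?, hrest, hsc,
      sw_str (PySem.Chars.lower s.toList) "analysis/" "analysis" rfl (by decide),
      sw_str (PySem.Chars.lower s.toList) "auxiliary/" "auxiliary" rfl (by decide),
      sw_str (PySem.Chars.lower s.toList) "browser_exploits/" "browser_exploits" rfl (by decide),
      sw_str (PySem.Chars.lower s.toList) "browser_auxiliary/" "browser_auxiliary" rfl (by decide),
      sw_str (PySem.Chars.lower s.toList) "docker_environment/" "docker_environment" rfl (by decide),
      sw_str (PySem.Chars.lower s.toList) "exploits/" "exploits" rfl (by decide),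
      sw_str (PySem.Chars.lower s.toList) "scanner/" "scanner" rfl (by decide),
      sw_str (PySem.Chars.lower s.toList) "post/" "post" rfl (by decide),
      sw_str (PySem.Chars.lower s.toList) "payloads/" "payloads" rfl (by decide),
      sw_str (PySem.Chars.lower s.toList) "payload/" "payload" rfl (by decide),
      sw_str (PySem.Chars.lower s.toList) "workflow/" "workflow" rfl (by decide),
      sw_str (PySem.Chars.lower s.toList) "listeners/" "listeners" rfl (by decide),
      sw_str (PySem.Chars.lower s.toList) "listener/" "listener" rfl (by decide),
      sw_str (PySem.Chars.lower s.toList) "encoders/" "encoders" rfl (by decide),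
      sw_str (PySem.Chars.lower s.toList) "encoder/" "encoder" rfl (by decide),
      sw_str (PySem.Chars.lower s.toList) "obfuscators/" "obfuscators" rfl (by decide),
      sw_str (PySem.Chars.lower s.toList) "obfuscator/" "obfuscator" rfl (by decide),
      sw_str (PySem.Chars.lower s.toList) "backdoors/" "backdoors" rfl (by decide),
      sw_str (PySem.Chars.lower s.toList) "shortcut/" "shortcut" rfl (by decide)]
    simp only [show ("/" : String).toList = ['/'] from rfl, hrest]
    norm_num
    norm_num at hlow
    simp only [hlow]
    by_cases hmem : '/' ∈ PySem.Chars.lower s.toList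
    · simp only [hmem, and_true]
      generalize List.takeWhile (fun x => !decide (x = '/')) (PySem.Chars.lower s.toList) = hd
      by_cases h0 : hd = "analysis".toList
      · subst h0; rfl
      simp only [h0, false_and, if_false]
      by_cases h1 : hd = "auxiliary".toList
      · subst h1; rfl
      simp only [h1, false_and, if_false]
      by_cases h2 : hd = "browser_exploits".toList
      · subst h2; rfl
      simp only [h2, false_and, if_false]
      by_cases h3 : hd = "browser_auxiliary".toList
      · subst h3; rfl
      simp only [h3, false_and, if_false]
      by_cases h4 : hd = "docker_environment".toList
      · subst h4; rfl
      simp only [h4, false_and, if_false]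
      by_cases h5 : hd = "exploits".toList
      · subst h5; rfl
      simp only [h5, false_and, if_false]
      by_cases h6 : hd = "scanner".toList
      · subst h6; rfl
      simp only [h6, false_and, if_false]
      by_cases h7 : hd = "post".toList
      · subst h7; rfl
      simp only [h7, false_and, if_false]
      by_cases h8 : hd = "payloads".toList
      · subst h8; rfl
      simp only [h8, false_and, if_false]
      by_cases h9 : hd = "payload".toList
      · subst h9; rfl
      simp only [h9, false_and, if_false]
      by_cases h10 : hd = "workflow".toList
      · subst h10; rfl
      simp only [h10, false_and, if_false]
      by_cases h11 : hd = "listeners".toList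
      · subst h11; rfl
      simp only [h11, false_and, if_false]
      by_cases h12 : hd = "listener".toList
      · subst h12; rfl
      simp only [h12, false_and, if_false]
      by_cases h13 : hd = "encoders".toList
      · subst h13; rfl
      simp only [h13, false_and, if_false]
      by_cases h14 : hd = "encoder".toList
      · subst h14; rfl
      simp only [h14, false_and, if_false]
      by_cases h15 : hd = "obfuscators".toList
      · subst h15; rfl
      simp only [h15, false_and, if_false]
      by_cases h16 : hd = "obfuscator".toList
      · subst h16; rfl
      simp only [h16, false_and, if_false]
      by_cases h17 : hd = "backdoors".toList
      · subst h17; rfl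
      simp only [h17, false_and, if_false]
      by_cases h18 : hd = "shortcut".toList
      · subst h18; rfl
      simp only [h18, false_and, if_false]
      have hit : pvPrefixMap.items = ([("analysis", "auxiliary"), ("auxiliary", "auxiliary"), ("browser_exploits", "browser_exploits"), ("browser_auxiliary", "browser_auxiliary"), ("docker_environment", "docker_environment"), ("exploits", "exploits"), ("scanner", "scanner"), ("post", "post"), ("payloads", "payloads"), ("payload", "payloads"), ("workflow", "workflow"), ("listeners", "listeners"), ("listener", "listeners"), ("encoders", "encoders"), ("encoder", "encoders"), ("obfuscators", "obfuscator"), ("obfuscator", "obfuscator"), ("backdoors", "backdoors"), ("shortcut", "shortcut")] : List (String × String)) := rfl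
      simp only [PySem.Dict.contains, hit, List.any_cons, List.any_nil, lit_beq, h0, h1, h2, h3, h4, h5, h6, h7, h8, h9, h10, h11, h12, h13, h14, h15, h16, h17, h18]
      norm_num [pvRemap]
    · simp only [hmem, and_false, if_false]
      norm_num [pvRemap]

-- ===== VERDICT (by name: the statement is the Claim_ definition above) =====
theorem infer_module_type_from_path_spec : Claim_equal_infer_module_type_from_path := by
  intro s _
  exact main_eq s
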